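-- pv_equiv track=rewrite | github.com/stolniceanudenisa/Python-Algorithms-and-Programming | Lab/Labs Python/Lab 3 - 5/domain/activities.py | removeFrom
-- ===== SOURCE A (Python) =====
-- def removeFrom(index1, index2, a_list):
--     '''
--     Delete score of participants from index1 to index2
--     IN: a natural number
--     OUT: the list without one element if condis respected
--     CONDIS:
--     index2 >= index1, index1 positive, index2 less than length of list
--     '''
--     if index2 < index1 or index2>= len(a_list) or index1<0:
--         return a_list
--
--     dif=index2-index1 + 1
--     for i in range(index1, len(a_list)-dif):
--         if i+dif >= len(a_list):
--             break
--         a_list[i] = a_list[i + dif]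
--
--     for i in range(0, dif):
--         a_list.pop()
--
--     return a_list
-- ===== SOURCE B (Python) =====
-- def removeFrom(index1, index2, a_list):
--     if index2 < index1 or index2 >= len(a_list) or index1 < 0:
--         return a_list
--     a_list[:] = a_list[:index1] + a_list[index2 + 1:]
--     return a_list
-- ===== Notes on version B (the rewrite author's own statement) =====
-- stated objective: simpler
-- what changed: Replaces the element-by-element shift loop followed by a pop loop with a single in-place slice rebind a_list[:] = a_list[:index1] + a_list[index2+1:], after the same bounds guard.
import Mathlib
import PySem

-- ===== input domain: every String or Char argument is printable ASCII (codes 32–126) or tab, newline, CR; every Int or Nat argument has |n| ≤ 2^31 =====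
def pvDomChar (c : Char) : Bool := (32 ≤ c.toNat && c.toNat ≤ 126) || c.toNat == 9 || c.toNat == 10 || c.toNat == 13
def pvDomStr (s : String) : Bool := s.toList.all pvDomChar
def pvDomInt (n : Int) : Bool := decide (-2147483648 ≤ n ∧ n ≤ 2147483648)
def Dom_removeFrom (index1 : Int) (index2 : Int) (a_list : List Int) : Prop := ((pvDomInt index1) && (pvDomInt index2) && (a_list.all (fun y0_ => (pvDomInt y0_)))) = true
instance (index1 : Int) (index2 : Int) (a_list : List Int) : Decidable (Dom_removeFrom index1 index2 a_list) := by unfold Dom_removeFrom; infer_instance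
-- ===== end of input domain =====

-- B deletes the index range by an in-place slice rebind (a_list[:] = a_list[:index1] + a_list[index2+1:])
-- instead of A's shift loop plus pop loop; both mutate the caller's list in place, equivalence proved on the return value.

-- ===== PORT A =====
-- the first loop of A: for i in range(index1, len-dif): if i+dif >= len: break; a_list[i] = a_list[i+dif]
def removeFromShift (dif : Int) (idxs : List Int) (l : List Int) : List Int :=
  match idxs with
  | [] => l
  | i :: rest =>
    if (l.length : Int) ≤ i + dif then l          -- the 'break'
    else
      match PySem.List.pyGet? l (i + dif) with    -- a_list[i + dif]
      | none => l                                  -- unreachable: index in range when reached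
      | some v => removeFromShift dif rest (l.set i.toNat v)

def removeFrom (index1 : Int) (index2 : Int) (a_list : List Int) : List Int :=
  if index2 < index1 ∨ (a_list.length : Int) ≤ index2 ∨ index1 < 0 then a_list
  else
    let dif := index2 - index1 + 1
    let l1 := removeFromShift dif (PySem.List.pyRange index1 ((a_list.length : Int) - dif)) a_list
    -- for i in range(0, dif): a_list.pop()
    (PySem.List.pyRange 0 dif).foldl (fun acc _ => acc.dropLast) l1

-- ===== PORT B =====
def removeFrom_alt (index1 : Int) (index2 : Int) (a_list : List Int) : List Int :=
  if index2 < index1 ∨ (a_list.length : Int) ≤ index2 ∨ index1 < 0 then a_list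
  else PySem.List.slice a_list none (some index1) ++ PySem.List.slice a_list (some (index2 + 1)) none

-- ===== PRECONDITION & SPEC =====
def Spec_removeFrom (index1 : Int) (index2 : Int) (a_list : List Int) (out : List Int) : Prop := out = removeFrom_alt index1 index2 a_list
instance (index1 : Int) (index2 : Int) (a_list : List Int) (out : List Int) : Decidable (Spec_removeFrom index1 index2 a_list out) := by unfold Spec_removeFrom; infer_instance

-- ===== CLAIM (what is proved, stated in full; the proofs are below) =====
def Claim_equal_removeFrom : Prop := ∀ (index1 : Int) (index2 : Int) (a_list : List Int), Dom_removeFrom index1 index2 a_list → Spec_removeFrom index1 index2 a_list (removeFrom index1 index2 a_list)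

-- ===== LEMMAS AND PROOFS =====

lemma take_succ_set {α : Type} (l : List α) (i : Nat) (v : α) (h : i < l.length) :
    (l.set i v).take (i + 1) = l.take i ++ [v] := by
  induction l generalizing i with
  | nil => simp at h
  | cons a t ih =>
    cases i with
    | zero => simp
    | succ j =>
      simp only [List.set, List.take, List.cons_append]
      exact congrArg (a :: ·) (ih j (by simpa using h))

-- the first loop rewrites positions i .. m-1 to the values dif further right
lemma removeFromShift_eq (dif : Nat) (hd : 1 ≤ dif) :
    ∀ (k i : Nat) (l : List Int), l.length - dif - i = k → i + dif ≤ l.length →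
    removeFromShift (dif : Int) (PySem.List.pyRange (i : Int) (((l.length - dif : Nat) : Int))) l
      = l.take i ++ l.drop (i + dif) ++ l.drop (l.length - dif) := by
  intro k
  induction k with
  | zero =>
    intro i l hk h
    have hi : i = l.length - dif := by omega
    have hrange : ((l.length - dif : Nat) : Int) ≤ (i : Int) := by omega
    rw [PySem.List.pyRange_one_eq_nil hrange]
    simp only [removeFromShift]
    rw [hi, show l.length - dif + dif = l.length by omega]
    simp [List.take_append_drop]
  | succ k ih =>
    intro i l hk h
    have hlt : i < l.length - dif := by omega
    have hltI : (i : Int) < ((l.length - dif : Nat) : Int) := by exact_mod_cast hlt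
    rw [PySem.List.pyRange_one_cons hltI]
    have hidx : i + dif < l.length := by omega
    have hcond : ¬ ((l.length : Int) ≤ (i : Int) + (dif : Int)) := by
      push_cast; omega
    have hget : PySem.List.pyGet? l ((i : Int) + (dif : Int)) = some l[i + dif] := by
      simp only [PySem.List.pyGet?, PySem.List.pyIdx?]
      rw [if_pos (show (0:Int) ≤ (i : Int) + (dif : Int) by omega),
          if_pos (show (i : Int) + (dif : Int) < (l.length : Int) by omega)]
      have ht : ((i : Int) + (dif : Int)).toNat = i + dif := by omega
      simp [ht, List.getElem?_eq_getElem hidx]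
    have hcast : ((i : Int) + 1) = ((i + 1 : Nat) : Int) := by omega
    have htoNat : ((i : Int)).toNat = i := Int.toNat_natCast i
    simp only [removeFromShift, hcond, if_false, hget, htoNat, hcast]
    set v := l[i + dif] with hv
    set l' := l.set i v with hl'
    have hlen' : l'.length = l.length := by simp [hl']
    rw [show ((l.length - dif : Nat) : Int) = ((l'.length - dif : Nat) : Int) by rw [hlen']]
    rw [ih (i + 1) l' (by omega) (by omega)]
    rw [hlen']
    have h1 : l'.take (i + 1) = l.take i ++ [v] := take_succ_set l i v (by omega)
    have h2 : l'.drop (i + 1 + dif) = l.drop (i + 1 + dif) := List.drop_set_of_lt (by omega)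
    have h3 : l'.drop (l.length - dif) = l.drop (l.length - dif) := List.drop_set_of_lt (by omega)
    rw [h1, h2, h3]
    have h4 : l.drop (i + dif) = v :: l.drop (i + dif + 1) := List.drop_eq_getElem_cons hidx
    rw [h4]
    simp [List.append_assoc]
    rw [show i + 1 + dif = i + dif + 1 by omega]

-- the second loop: popping once per range element takes off that many last elements
lemma foldl_dropLast_eq_take {α : Type} :
    ∀ (idxs : List Int) (l : List α),
    idxs.foldl (fun acc _ => acc.dropLast) l = l.take (l.length - idxs.length) := by
  intro idxs
  induction idxs with
  | nil => intro l; simp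
  | cons x rest ih =>
    intro l
    simp only [List.foldl_cons]
    rw [ih l.dropLast, List.dropLast_eq_take, List.take_take, List.length_take]
    congr 1
    simp [List.length_cons]
    omega

lemma length_pyRange_zero (n : Nat) : (PySem.List.pyRange 0 (n : Int)).length = n := by
  rw [PySem.List.pyRange_zero_natCast]; simp

-- ===== VERDICT (by name: the statement is the Claim_ definition above) =====
theorem removeFrom_spec : Claim_equal_removeFrom := by
  unfold Claim_equal_removeFrom
  intro index1 index2 a_list _
  unfold Spec_removeFrom removeFrom removeFrom_alt
  by_cases hg : index2 < index1 ∨ (a_list.length : Int) ≤ index2 ∨ index1 < 0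
  · simp [hg]
  · simp only [hg, if_false]
    push Not at hg
    obtain ⟨h12, h2n, h1p⟩ := hg
    set n := a_list.length with hn
    -- Nat versions of the indices
    obtain ⟨i1, hi1⟩ : ∃ i1 : Nat, index1 = (i1 : Int) := ⟨index1.toNat, (Int.toNat_of_nonneg h1p).symm⟩
    obtain ⟨i2, hi2⟩ : ∃ i2 : Nat, index2 = (i2 : Int) := ⟨index2.toNat, (Int.toNat_of_nonneg (le_trans h1p h12)).symm⟩
    have hi12 : i1 ≤ i2 := by omega
    have hi2n : i2 < n := by omega
    set difn : Nat := i2 - i1 + 1 with hdifn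
    have hdif : index2 - index1 + 1 = (difn : Int) := by omega
    have hnd : (n : Int) - (difn : Int) = ((n - difn : Nat) : Int) := by omega
    rw [hdif, hnd, hi1]
    rw [removeFromShift_eq difn (by omega) (n - difn - i1) i1 a_list rfl (by omega)]
    rw [foldl_dropLast_eq_take, length_pyRange_zero]
    have hlen : (a_list.take i1 ++ a_list.drop (i1 + difn) ++ a_list.drop (n - difn)).length = n := by
      simp [← hn]; omega
    rw [hlen]
    have hfront : (a_list.take i1 ++ a_list.drop (i1 + difn)).length = n - difn := by
      simp [← hn]; omega
    rw [List.take_append_of_le_length (by rw [hfront]),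
        show n - difn = (List.take i1 a_list ++ List.drop (i1 + difn) a_list).length from hfront.symm,
        List.take_length]
    rw [hi2, show ((i2 : Int) + 1) = ((i2 + 1 : Nat) : Int) by push_cast; ring]
    rw [PySem.List.slice_to_natCast, PySem.List.slice_from_natCast]
    rw [show i1 + difn = i2 + 1 by omega]
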